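-- pv_equiv track=rewrite | github.com/SiQube/aoc2023 | day03/part1.py | _check_for_symbol
-- ===== SOURCE A (Python) =====
-- import itertools
--
-- def _check_for_symbol(
--         tup: tuple[int, int],
--         part_positions: list[tuple[int, int]],
-- ) -> bool:
--     for direction in itertools.product([-1, 0, 1], [-1, 0, 1]):
--         _tup = (tup[0] + direction[0], tup[1] + direction[1])
--         if _tup in part_positions:
--             return True
--     return False
-- ===== SOURCE B (Python) =====
-- def _check_for_symbol(
--         tup: tuple[int, int],
--         part_positions: list[tuple[int, int]],
-- ) -> bool:
--     for p in part_positions: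
--         if abs(p[0] - tup[0]) <= 1 and abs(p[1] - tup[1]) <= 1:
--             return True
--     return False
-- ===== Notes on version B (the rewrite author's own statement) =====
-- stated objective: simpler
-- what changed: B iterates over part_positions itself and tests Chebyshev distance <= 1, instead of generating the 9 neighbour offsets and doing a membership scan of the list for each.
import Mathlib
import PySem

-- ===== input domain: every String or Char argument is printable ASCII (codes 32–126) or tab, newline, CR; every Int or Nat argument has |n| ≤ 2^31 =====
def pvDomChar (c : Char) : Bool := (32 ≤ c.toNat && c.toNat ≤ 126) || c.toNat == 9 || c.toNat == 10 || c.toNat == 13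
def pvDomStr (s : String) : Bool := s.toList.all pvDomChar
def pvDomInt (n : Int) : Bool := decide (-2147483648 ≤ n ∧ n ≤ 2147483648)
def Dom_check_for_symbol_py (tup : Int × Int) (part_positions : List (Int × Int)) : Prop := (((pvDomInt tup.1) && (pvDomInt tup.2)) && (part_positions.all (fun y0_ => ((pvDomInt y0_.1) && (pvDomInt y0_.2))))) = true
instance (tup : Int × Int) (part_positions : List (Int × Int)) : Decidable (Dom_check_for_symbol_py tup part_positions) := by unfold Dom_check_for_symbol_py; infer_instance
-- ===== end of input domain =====

-- ===== PORT A =====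
-- A: for each of the 9 offsets from product([-1,0,1],[-1,0,1]) (in that order),
-- early-return True if tup+offset is in part_positions.
def check_for_symbol_py (tup : Int × Int) (part_positions : List (Int × Int)) : Bool :=
  ([((-1 : Int), (-1 : Int)), (-1, 0), (-1, 1), (0, -1), (0, 0), (0, 1), (1, -1), (1, 0), (1, 1)]).any
    (fun direction => part_positions.contains (tup.1 + direction.1, tup.2 + direction.2))

-- ===== PORT B =====
-- B: scan part_positions once; early-return True at the first p within Chebyshev distance 1 of tup.
def check_for_symbol_py_alt (tup : Int × Int) (part_positions : List (Int × Int)) : Bool :=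
  part_positions.any (fun p => decide (|p.1 - tup.1| ≤ 1) && decide (|p.2 - tup.2| ≤ 1))

-- ===== PRECONDITION & SPEC =====
def Spec_check_for_symbol_py (tup : Int × Int) (part_positions : List (Int × Int)) (out : Bool) : Prop := out = check_for_symbol_py_alt tup part_positions
instance (tup : Int × Int) (part_positions : List (Int × Int)) (out : Bool) : Decidable (Spec_check_for_symbol_py tup part_positions out) := by unfold Spec_check_for_symbol_py; infer_instance

-- ===== CLAIM (what is proved, stated in full; the proofs are below) =====
def Claim_equal_check_for_symbol_py : Prop := ∀ (tup : Int × Int) (part_positions : List (Int × Int)), Dom_check_for_symbol_py tup part_positions → Spec_check_for_symbol_py tup part_positions (check_for_symbol_py tup part_positions)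

-- ===== LEMMAS AND PROOFS =====
theorem check_for_symbol_eq (tup : Int × Int) (part_positions : List (Int × Int)) :
    check_for_symbol_py tup part_positions = check_for_symbol_py_alt tup part_positions := by
  simp only [check_for_symbol_py, check_for_symbol_py_alt, List.any_eq, List.contains_eq_any_beq,
    decide_eq_decide]
  simp only [Bool.and_eq_true, decide_eq_true_eq, beq_iff_eq]
  constructor
  · rintro ⟨d, hd, p, hp, hpe⟩
    refine ⟨p, hp, ?_, ?_⟩ <;>
      · fin_cases hd <;> simp_all [Prod.ext_iff, abs_le] <;> omega
  · rintro ⟨p, hp, h1, h2⟩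
    rw [abs_le] at h1 h2
    refine ⟨(p.1 - tup.1, p.2 - tup.2), ?_, p, hp, ?_⟩
    · have e1 : p.1 - tup.1 = -1 ∨ p.1 - tup.1 = 0 ∨ p.1 - tup.1 = 1 := by omega
      have e2 : p.2 - tup.2 = -1 ∨ p.2 - tup.2 = 0 ∨ p.2 - tup.2 = 1 := by omega
      rcases e1 with h | h | h <;> rcases e2 with h' | h' | h' <;> simp [h, h']
    · apply Prod.ext <;> simp

-- ===== VERDICT (by name: the statement is the Claim_ definition above) =====
theorem check_for_symbol_py_spec : Claim_equal_check_for_symbol_py := by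
  intro tup pp _
  exact check_for_symbol_eq tup pp
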